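-- pv_equiv track=rewrite | github.com/8bitbanana/music-converter | main.py | matchId
-- ===== SOURCE A (Python) =====
-- import sys, traceback, copy, json, os, random, string, isodate, webbrowser
--
-- def matchId(service, text, searchType):
--     requirements = {
--         "spotify": {
--             "length":{
--                 "track":22,
--                 "album":22,
--                 "playlist":22
--             },
--             "chars": string.ascii_letters + string.digits
--         },
--         "youtube": {
--             "length":{
--                 "track":11,
--                 "playlist":34,
--                 "album":-1
--             },
--             "chars": string.ascii_letters + string.digits + "_-"
--         }
--     }
--     if not service in requirements:
--         raise ValueError("Invalid service for id_matching")
--     substrings = []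
--     current_substring = ""
--     for x in text:
--         if x in requirements[service]['chars']:
--             current_substring += x
--         else:
--             if current_substring:
--                 substrings.append(current_substring)
--                 current_substring = ""
--     if current_substring:
--         substrings.append(current_substring)
--     return {
--         "tracks": [x for x in substrings if len(x) == requirements[service]['length']['track'] and searchType == "track"],
--         "playlists": [x for x in substrings if len(x) == requirements[service]['length']['playlist'] and searchType == "playlist"],
--         "albums": [x for x in substrings if len(x) == requirements[service]['length']['album'] and searchType == "album"]
--     }
-- ===== SOURCE B (Python) =====
-- import string
--
-- def matchId(service, text, searchType):
--     chars = {
--         "spotify": string.ascii_letters + string.digits,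
--         "youtube": string.ascii_letters + string.digits + "_-",
--     }
--     lengths = {
--         "spotify": {"track": 22, "album": 22, "playlist": 22},
--         "youtube": {"track": 11, "playlist": 34, "album": -1},
--     }
--     if service not in chars:
--         raise ValueError("Invalid service for id_matching")
--     allowed = set(chars[service])
--     # mask every disallowed char to a space, let str.split() do the tokenization
--     tokens = "".join(c if c in allowed else " " for c in text).split()
--     L = lengths[service]
--     return {
--         "tracks": [t for t in tokens if searchType == "track" and len(t) == L["track"]],
--         "playlists": [t for t in tokens if searchType == "playlist" and len(t) == L["playlist"]],
--         "albums": [t for t in tokens if searchType == "album" and len(t) == L["album"]],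
--     }
-- ===== Notes on version B (the rewrite author's own statement) =====
-- stated objective: idiomatic
-- what changed: Replaces A's char-by-char accumulator tokenization with masking disallowed characters to spaces and letting str.split() produce the tokens (library segmentation instead of a manual run-building loop); the three filtered lists then read off the same tokens.
import Mathlib
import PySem

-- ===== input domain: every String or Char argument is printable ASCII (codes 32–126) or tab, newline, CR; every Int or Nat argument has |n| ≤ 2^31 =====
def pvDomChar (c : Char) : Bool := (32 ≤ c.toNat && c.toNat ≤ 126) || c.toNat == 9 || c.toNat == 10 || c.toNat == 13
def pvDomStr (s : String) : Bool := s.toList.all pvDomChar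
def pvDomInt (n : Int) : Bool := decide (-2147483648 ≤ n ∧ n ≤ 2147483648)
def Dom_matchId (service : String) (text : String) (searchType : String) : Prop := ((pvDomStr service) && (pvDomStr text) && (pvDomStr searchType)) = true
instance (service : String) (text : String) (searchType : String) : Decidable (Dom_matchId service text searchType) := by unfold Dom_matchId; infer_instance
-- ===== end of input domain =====

-- B replaces A's char-by-char accumulator tokenization by masking disallowed chars
-- to spaces and tokenizing with str.split() (idiomatic; same cost).


-- ===== PORT A =====
-- requirements[service]['chars'] : string.ascii_letters + string.digits (+ "_-" for youtube)
def charsA (service : String) : List Char :=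
  if service = "spotify" then
    "abcdefghijklmnopqrstuvwxyzABCDEFGHIJKLMNOPQRSTUVWXYZ0123456789".toList
  else
    "abcdefghijklmnopqrstuvwxyzABCDEFGHIJKLMNOPQRSTUVWXYZ0123456789_-".toList

-- requirements[service]['length'][kind]
def lenA (service : String) (kind : String) : Int :=
  if service = "spotify" then 22
  else if kind = "track" then 11 else if kind = "playlist" then 34 else -1

-- A's for-loop over text: state = (substrings, current_substring)
def loopA (allowed : List Char) : List Char → List Char → List (List Char) → List (List Char)
  | [], cur, subs => if cur.isEmpty then subs else subs ++ [cur]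
  | c :: rest, cur, subs =>
      if allowed.contains c then loopA allowed rest (cur ++ [c]) subs
      else if cur.isEmpty then loopA allowed rest cur subs
      else loopA allowed rest [] (subs ++ [cur])

def matchId (service : String) (text : String) (searchType : String) : List (String × List String) :=
  if service ≠ "spotify" ∧ service ≠ "youtube" then []  -- Python raises ValueError here; excluded by Pre_
  else
    let subs := loopA (charsA service) text.toList [] []
    [("tracks", ((subs.filter (fun x => decide ((x.length : Int) = lenA service "track") && decide (searchType = "track"))).map String.ofList)),
     ("playlists", ((subs.filter (fun x => decide ((x.length : Int) = lenA service "playlist") && decide (searchType = "playlist"))).map String.ofList)),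
     ("albums", ((subs.filter (fun x => decide ((x.length : Int) = lenA service "album") && decide (searchType = "album"))).map String.ofList))]

-- ===== PORT B =====
def allowedB (service : String) : List Char :=
  if service = "spotify" then
    "abcdefghijklmnopqrstuvwxyzABCDEFGHIJKLMNOPQRSTUVWXYZ0123456789".toList
  else
    "abcdefghijklmnopqrstuvwxyzABCDEFGHIJKLMNOPQRSTUVWXYZ0123456789_-".toList

def lenB (service : String) (kind : String) : Int :=
  if service = "spotify" then 22
  else if kind = "track" then 11 else if kind = "playlist" then 34 else -1

def matchId_alt (service : String) (text : String) (searchType : String) : List (String × List String) :=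
  if service ≠ "spotify" ∧ service ≠ "youtube" then []  -- Python raises ValueError here; excluded by Pre_
  else
    -- tokens = "".join(c if c in allowed else " " for c in text).split()
    let masked := text.toList.map (fun c => if (allowedB service).contains c then c else ' ')
    let toks := PySem.Chars.split₀ masked
    [("tracks", ((toks.filter (fun t => decide (searchType = "track") && decide ((t.length : Int) = lenB service "track"))).map String.ofList)),
     ("playlists", ((toks.filter (fun t => decide (searchType = "playlist") && decide ((t.length : Int) = lenB service "playlist"))).map String.ofList)),
     ("albums", ((toks.filter (fun t => decide (searchType = "album") && decide ((t.length : Int) = lenB service "album"))).map String.ofList))]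

-- ===== PRECONDITION & SPEC =====
-- Pre_ excludes invalid services, on which A raises ValueError.
def Pre_matchId (service : String) (text : String) (searchType : String) : Prop :=
  service = "spotify" ∨ service = "youtube"
instance (service : String) (text : String) (searchType : String) : Decidable (Pre_matchId service text searchType) := by unfold Pre_matchId; infer_instance
def pvWitness_matchId : String × String × String := ("spotify", "abc def", "track")

def Spec_matchId (service : String) (text : String) (searchType : String) (out : List (String × List String)) : Prop := out = matchId_alt service text searchType
instance (service : String) (text : String) (searchType : String) (out : List (String × List String)) : Decidable (Spec_matchId service text searchType out) := by unfold Spec_matchId; infer_instance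

-- ===== CLAIM (what is proved, stated in full; the proofs are below) =====
def Claim_equal_matchId : Prop := ∀ (service : String) (text : String) (searchType : String), Dom_matchId service text searchType → Pre_matchId service text searchType → Spec_matchId service text searchType (matchId service text searchType)

-- ===== LEMMAS AND PROOFS =====

-- no allowed char is Python whitespace
lemma charsA_not_space (service : String) (c : Char) (h : (charsA service).contains c = true) :
    PySem.Chars.isspace c = false := by
  have hall1 : "abcdefghijklmnopqrstuvwxyzABCDEFGHIJKLMNOPQRSTUVWXYZ0123456789".toList.all
      (fun c => !PySem.Chars.isspace c) = true := by decide
  have hall2 : "abcdefghijklmnopqrstuvwxyzABCDEFGHIJKLMNOPQRSTUVWXYZ0123456789_-".toList.all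
      (fun c => !PySem.Chars.isspace c) = true := by decide
  unfold charsA at h
  split at h
  · have hm : c ∈ "abcdefghijklmnopqrstuvwxyzABCDEFGHIJKLMNOPQRSTUVWXYZ0123456789".toList := by
      simpa using h
    simpa using List.all_eq_true.mp hall1 c hm
  · have hm : c ∈ "abcdefghijklmnopqrstuvwxyzABCDEFGHIJKLMNOPQRSTUVWXYZ0123456789_-".toList := by
      simpa using h
    simpa using List.all_eq_true.mp hall2 c hm

-- the core tokenization equivalence: A's accumulator loop = split₀.go on the masked text
lemma loopA_eq_split (allowed : List Char)
    (hns : ∀ c, allowed.contains c = true → PySem.Chars.isspace c = false) :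
    ∀ (cs : List Char) (cur : List Char) (subs : List (List Char)),
      loopA allowed cs cur subs =
        PySem.Chars.split₀.go (cs.map (fun c => if allowed.contains c then c else ' '))
          cur.reverse subs.reverse := by
  intro cs
  induction cs with
  | nil =>
      intro cur subs
      by_cases h : cur = [] <;> simp [loopA, PySem.Chars.split₀.go, h]
  | cons c rest ih =>
      intro cur subs
      by_cases hc : allowed.contains c = true
      · have hm : c ∈ allowed := by simpa using hc
        have hsp := hns c hc
        simp [loopA, hm, PySem.Chars.split₀.go, hsp, ih (cur ++ [c]) subs]
      · have hm : c ∉ allowed := by simpa using hc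
        have hspace : PySem.Chars.isspace ' ' = true := by decide
        by_cases hcur : cur = []
        · simp [loopA, hm, hcur, PySem.Chars.split₀.go, hspace, ih [] subs]
        · simp [loopA, hm, hcur, PySem.Chars.split₀.go, hspace, ih [] (subs ++ [cur])]

-- ===== VERDICT (by name: the statement is the Claim_ definition above) =====
theorem matchId_spec : Claim_equal_matchId := by
  intro service text searchType _hdom hpre
  unfold Spec_matchId matchId matchId_alt
  have hvalid : ¬ (service ≠ "spotify" ∧ service ≠ "youtube") := by
    rcases hpre with h | h <;> simp [h]
  simp only [if_neg hvalid]
  have hchars : allowedB service = charsA service := by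
    unfold allowedB charsA; rfl
  have htok : loopA (charsA service) text.toList [] [] =
      PySem.Chars.split₀ (text.toList.map (fun c => if (allowedB service).contains c then c else ' ')) := by
    rw [hchars]
    simpa [PySem.Chars.split₀] using
      loopA_eq_split (charsA service) (charsA_not_space service) text.toList [] []
  have hlen : lenA = lenB := rfl
  rw [htok, hlen]
  congr 1 <;> [skip; congr 1] <;>
    simp [List.filter_congr, Bool.and_comm]
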